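-- pv_equiv track=rewrite | github.com/anilcandurgungithub/Kodlama-Okuryazarligi | project17.py | numLetterCount
-- ===== SOURCE A (Python) =====
-- def numLetterCount(n):
--     nums = {0:"", 1:"one", 2:"two", 3:"three", 4:"four", 5:"five", 6:"six",
--             7:"seven", 8:"eight", 9:"nine", 10:"ten", 11:"eleven", 12:"twelve",
--             13:"thirteen", 14:"forteen", 15:"fifteen", 16:"sixteen",
--             17:"seventeen", 18:"eighteen", 19:"nineteen", 20:"twenty",
--             30:"thirty", 40:"forty", 50:"fifty", 60:"sixty", 70:"seventy",
--             80:"eighty", 90:"ninety"}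
--     a, letter = 1, ""
--     while a <= n:
--         if a < 20:
--             letter += nums[a]
--         elif a < 100:
--             letter += nums[a-a%10] + nums[a%10]
--         elif a < 1000:
--             if a%100 == 0:
--                 letter += nums[a//100] + "hundred"
--             else:
--                 if a%100 in nums:
--                     letter += nums[a//100] + "hundredand" + nums[a%100]
--                 else:
--                     letter += nums[a//100] + "hundredand" + nums[a%100-a%10] + nums[a%10]
--         else:
--             letter += "onethousand"
--         a += 1
--
--     return len(letter), letter
-- ===== SOURCE B (Python) =====
-- def numLetterCount(n):
--     ones = ["", "one", "two", "three", "four", "five", "six", "seven", "eight",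
--             "nine", "ten", "eleven", "twelve", "thirteen", "forteen", "fifteen",
--             "sixteen", "seventeen", "eighteen", "nineteen"]
--     tens = ["", "", "twenty", "thirty", "forty", "fifty", "sixty", "seventy",
--             "eighty", "ninety"]
--     # spellings of 0..99, built once
--     W = [ones[i] if i < 20 else tens[i // 10] + ones[i % 10] for i in range(100)]
--     if n < 1:
--         return 0, ""
--     m = min(n, 999)
--     parts = ["".join(W[1:min(m, 99) + 1])]
--     for h in range(1, 10):
--         lo = 100 * h
--         if m >= lo:
--             k = min(m, lo + 99) - lo
--             head = ones[h] + "hundred"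
--             parts.append(head)
--             if k:
--                 hd = head + "and"
--                 parts.append(hd + hd.join(W[1:k + 1]))
--     s = "".join(parts)
--     if n > 999:
--         s += "onethousand" * (n - 999)
--     return len(s), s
-- ===== Notes on version B (the rewrite author's own statement) =====
-- stated objective: faster
-- what changed: A cases every single number 1..n through its 20/100/1000 branches inside one while-loop; B instead precomputes the 100 under-100 spellings once, emits the first block as a single slice-join, builds each hundreds block with at most 9 outer iterations via ('Xhundredand').join over a slice of the precomputed table, and emits the constant tail beyond the table by one string repetition.
import Mathlib
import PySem

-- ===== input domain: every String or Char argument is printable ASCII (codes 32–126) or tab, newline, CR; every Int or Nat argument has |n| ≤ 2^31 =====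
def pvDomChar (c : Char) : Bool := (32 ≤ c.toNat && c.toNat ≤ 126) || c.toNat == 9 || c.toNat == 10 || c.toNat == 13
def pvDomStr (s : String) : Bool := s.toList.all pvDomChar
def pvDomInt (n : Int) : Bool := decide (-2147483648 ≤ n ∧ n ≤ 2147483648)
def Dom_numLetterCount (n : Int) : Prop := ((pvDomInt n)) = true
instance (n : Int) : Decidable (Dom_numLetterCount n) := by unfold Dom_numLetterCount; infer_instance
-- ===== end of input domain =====

-- B replaces A's per-number casing loop by a table-and-blocks construction: the 100 under-100
-- spellings are computed once, block 0 is one slice-join, and each hundreds block is produced by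
-- one join with separator "Xhundredand" over a slice of the table (at most 9 outer iterations),
-- with the constant "onethousand" tail emitted by string repetition.

-- ===== PORT A =====
-- A's dict of number words ("forteen" kept verbatim).
def pvNumsA : PySem.Dict Int String := PySem.Dict.ofList
  [(0, ""), (1, "one"), (2, "two"), (3, "three"), (4, "four"), (5, "five"), (6, "six"),
   (7, "seven"), (8, "eight"), (9, "nine"), (10, "ten"), (11, "eleven"), (12, "twelve"),
   (13, "thirteen"), (14, "forteen"), (15, "fifteen"), (16, "sixteen"),
   (17, "seventeen"), (18, "eighteen"), (19, "nineteen"), (20, "twenty"),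
   (30, "thirty"), (40, "forty"), (50, "fifty"), (60, "sixty"), (70, "seventy"),
   (80, "eighty"), (90, "ninety")]

-- One iteration of A's while-loop body (every nums[...] lookup in A hits an existing key
-- for the a ≥ 1 the loop produces, so Dict.getD "" is exact here).
def pvBodyA (letter : String) (a : Int) : String :=
  if a < 20 then letter ++ pvNumsA.getD a ""
  else if a < 100 then
    letter ++ (pvNumsA.getD (a - PySem.Int.mod a 10) "" ++ pvNumsA.getD (PySem.Int.mod a 10) "")
  else if a < 1000 then
    if PySem.Int.mod a 100 = 0 then
      letter ++ (pvNumsA.getD (PySem.Int.floordiv a 100) "" ++ "hundred")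
    else if pvNumsA.contains (PySem.Int.mod a 100) then
      letter ++ (pvNumsA.getD (PySem.Int.floordiv a 100) "" ++ "hundredand" ++
        pvNumsA.getD (PySem.Int.mod a 100) "")
    else
      letter ++ (pvNumsA.getD (PySem.Int.floordiv a 100) "" ++ "hundredand" ++
        pvNumsA.getD (PySem.Int.mod a 100 - PySem.Int.mod a 10) "" ++
        pvNumsA.getD (PySem.Int.mod a 10) "")
  else letter ++ "onethousand"

-- 'a, letter = 1, ""; while a <= n: … ; a += 1'  ≡  folding the body over range(1, n+1).
def numLetterCount (n : Int) : Int × String :=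
  let letter := (PySem.List.pyRange 1 (n + 1) 1).foldl pvBodyA ""
  (PySem.Str.len letter, letter)

-- ===== PORT B =====
def pvOnes : List String :=
  ["", "one", "two", "three", "four", "five", "six", "seven", "eight", "nine", "ten",
   "eleven", "twelve", "thirteen", "forteen", "fifteen", "sixteen", "seventeen",
   "eighteen", "nineteen"]

def pvTens : List String :=
  ["", "", "twenty", "thirty", "forty", "fifty", "sixty", "seventy", "eighty", "ninety"]

-- Source B's 'W = [ones[i] if i < 20 else tens[i // 10] + ones[i % 10] for i in range(100)]'
-- (all indexings are in range, so pyGetD "" is exact).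
def pvW : List String :=
  (PySem.List.pyRange 0 100 1).map (fun i =>
    if i < 20 then PySem.List.pyGetD pvOnes i ""
    else PySem.List.pyGetD pvTens (PySem.Int.floordiv i 10) "" ++
      PySem.List.pyGetD pvOnes (PySem.Int.mod i 10) "")

-- Python's 'str * k' (k ≥ 0), ported by hand: exact for nonnegative counts.
def pvStrMul (s : String) : Nat → String
  | 0 => ""
  | k + 1 => s ++ pvStrMul s k

def numLetterCount_alt (n : Int) : Int × String :=
  if n < 1 then (0, "")
  else
    let m := min n 999
    let parts : List String :=
      [PySem.Str.join "" (PySem.List.slice pvW (some 1) (some (min m 99 + 1)))]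
    let parts := (PySem.List.pyRange 1 10 1).foldl (fun parts h =>
      if 100 * h ≤ m then
        let k := min m (100 * h + 99) - 100 * h
        let head := PySem.List.pyGetD pvOnes h "" ++ "hundred"
        let parts := parts ++ [head]
        if k ≠ 0 then
          let hd := head ++ "and"
          parts ++ [hd ++ PySem.Str.join hd (PySem.List.slice pvW (some 1) (some (k + 1)))]
        else parts
      else parts) parts
    let s := PySem.Str.join "" parts
    let s := if 999 < n then s ++ pvStrMul "onethousand" (n - 999).toNat else s
    (PySem.Str.len s, s)

-- ===== PRECONDITION & SPEC =====
def Spec_numLetterCount (n : Int) (out : Int × String) : Prop := out = numLetterCount_alt n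
instance (n : Int) (out : Int × String) : Decidable (Spec_numLetterCount n out) := by unfold Spec_numLetterCount; infer_instance

-- ===== CLAIM (what is proved, stated in full; the proofs are below) =====
def Claim_equal_numLetterCount : Prop := ∀ (n : Int), Dom_numLetterCount n → Spec_numLetterCount n (numLetterCount n)

-- ===== LEMMAS AND PROOFS =====

-- The word A appends for a single number a (1 ≤ a ≤ 999), phrased through B's table pvW.
def pvWord (a : Int) : String :=
  if a < 100 then PySem.List.pyGetD pvW a ""
  else
    let head := PySem.List.pyGetD pvOnes (PySem.Int.floordiv a 100) "" ++ "hundred"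
    let r := PySem.Int.mod a 100
    if r = 0 then head else head ++ "and" ++ PySem.List.pyGetD pvW r ""

-- What one iteration of B's block loop appends.
def pvG (m h : Int) : List String :=
  if 100 * h ≤ m then
    [PySem.List.pyGetD pvOnes h "" ++ "hundred"] ++
      (if min m (100 * h + 99) - 100 * h ≠ 0 then
        [((PySem.List.pyGetD pvOnes h "" ++ "hundred") ++ "and") ++
          PySem.Str.join ((PySem.List.pyGetD pvOnes h "" ++ "hundred") ++ "and")
            (PySem.List.slice pvW (some 1) (some ((min m (100 * h + 99) - 100 * h) + 1)))]
      else [])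
  else []

-- Concatenation of a list of strings, at the char level.
def pvCat (l : List String) : List Char := (l.map String.toList).flatten

-- A's <100 lookups agree with B's table pvW (finite check).
set_option maxRecDepth 100000 in
theorem pvLowEq : ∀ a ∈ PySem.List.pyRange 1 100 1,
    (if a < 20 then pvNumsA.getD a ""
      else pvNumsA.getD (a - PySem.Int.mod a 10) "" ++ pvNumsA.getD (PySem.Int.mod a 10) "") =
    PySem.List.pyGetD pvW a "" := by decide

-- A's under-100 tail inside the hundreds branch agrees with B's table on 1..99.
set_option maxRecDepth 100000 in
theorem pvInnerEq : ∀ r ∈ PySem.List.pyRange 1 100 1,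
    (if pvNumsA.contains r then pvNumsA.getD r ""
      else pvNumsA.getD (r - PySem.Int.mod r 10) "" ++ pvNumsA.getD (PySem.Int.mod r 10) "") =
    PySem.List.pyGetD pvW r "" := by decide

-- A's hundreds-digit lookup agrees with B's ones table.
theorem pvHeadEq : ∀ h ∈ PySem.List.pyRange 1 10 1,
    pvNumsA.getD h "" = PySem.List.pyGetD pvOnes h "" := by decide

-- One loop iteration of A appends exactly pvWord a, for 1 ≤ a ≤ 999.
theorem pvBodyA_eq_word (letter : String) (a : Int) (h1 : 1 ≤ a) (h2 : a ≤ 999) :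
    pvBodyA letter a = letter ++ pvWord a := by
  unfold pvBodyA pvWord
  by_cases h100 : a < 100
  · have := pvLowEq a (by rw [PySem.List.mem_pyRange_one]; omega)
    by_cases h20 : a < 20
    · rw [if_pos h20, if_pos h100, ← this, if_pos h20]
    · rw [if_neg h20, if_pos h100, if_pos h100, ← this, if_neg h20]
  · -- hundreds branch
    rw [if_neg (by omega : ¬ a < 20), if_neg h100, if_pos (by omega : a < 1000), if_neg h100]
    have hh1 : 1 ≤ PySem.Int.floordiv a 100 := by
      rw [PySem.Int.le_floordiv_iff_mul_le (by norm_num)]; omega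
    have hh9 : PySem.Int.floordiv a 100 < 10 := by
      rw [PySem.Int.floordiv_lt_iff_lt_mul (by norm_num)]; omega
    have hHead : pvNumsA.getD (PySem.Int.floordiv a 100) "" =
        PySem.List.pyGetD pvOnes (PySem.Int.floordiv a 100) "" :=
      pvHeadEq _ (by rw [PySem.List.mem_pyRange_one]; omega)
    have hr0 : 0 ≤ PySem.Int.mod a 100 := PySem.Int.mod_nonneg a (by norm_num)
    have hr99 : PySem.Int.mod a 100 < 100 := PySem.Int.mod_lt a (by norm_num)
    have hmm : PySem.Int.mod a 10 = PySem.Int.mod (PySem.Int.mod a 100) 10 := by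
      rw [PySem.Int.mod_eq_emod_of_pos (by norm_num), PySem.Int.mod_eq_emod_of_pos (by norm_num),
        PySem.Int.mod_eq_emod_of_pos (by norm_num), Int.emod_emod_of_dvd a (by norm_num : (10:Int) ∣ 100)]
    by_cases hr : PySem.Int.mod a 100 = 0
    · rw [if_pos hr, if_pos hr, hHead]
    · rw [if_neg hr, if_neg hr]
      have hInner := pvInnerEq (PySem.Int.mod a 100) (by rw [PySem.List.mem_pyRange_one]; omega)
      rw [← hInner]
      by_cases hc : pvNumsA.contains (PySem.Int.mod a 100)
      · rw [if_pos hc, if_pos hc, hHead]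
        simp only [String.append_assoc]
        rw [show ("hundredand" : String) = "hundred" ++ "and" from rfl, String.append_assoc]
      · rw [if_neg hc, if_neg hc, hHead, ← hmm]
        simp only [String.append_assoc]
        rw [show ("hundredand" : String) = "hundred" ++ "and" from rfl, String.append_assoc]

-- A's fold over a list of 1..999 values is the join of the words.
theorem pvFold_join (l : List Int) (hl : ∀ a ∈ l, 1 ≤ a ∧ a ≤ 999) (init : String) :
    l.foldl pvBodyA init = init ++ PySem.Str.join "" (l.map pvWord) := by
  induction l generalizing init with
  | nil => simp [PySem.Str.join, PySem.Chars.join, List.intercalate]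
  | cons a l ih =>
    have ha := hl a (List.mem_cons_self ..)
    have hjoin : PySem.Str.join "" (pvWord a :: l.map pvWord) =
        pvWord a ++ PySem.Str.join "" (l.map pvWord) := by
      apply String.toList_injective
      cases l <;> simp [PySem.Str.join, PySem.Chars.join, List.intercalate]
    simp only [List.foldl_cons, List.map_cons, hjoin,
      ih (fun b hb => hl b (List.mem_cons_of_mem _ hb)),
      pvBodyA_eq_word init a ha.1 ha.2, String.append_assoc]

-- A's fold over a list of ≥ 1000 values appends "onethousand" length-many times.
theorem pvFold_big (l : List Int) (hl : ∀ a ∈ l, 1000 ≤ a) (init : String) :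
    l.foldl pvBodyA init = init ++ pvStrMul "onethousand" l.length := by
  induction l generalizing init with
  | nil => simp [pvStrMul]
  | cons a l ih =>
    have hbig : pvBodyA init a = init ++ "onethousand" := by
      unfold pvBodyA
      have := hl a (List.mem_cons_self ..)
      rw [if_neg (by omega), if_neg (by omega), if_neg (by omega)]
    simp only [List.foldl_cons, List.length_cons,
      ih (fun b hb => hl b (List.mem_cons_of_mem _ hb)), hbig]
    have : ∀ k : Nat, ("onethousand" : String) ++ pvStrMul "onethousand" k =
        pvStrMul "onethousand" (k + 1) := by intro k; rfl
    rw [String.append_assoc, this]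

-- ''.join at the char level is flatten.
theorem pvJoinNil (l : List (List Char)) : PySem.Chars.join [] l = l.flatten := by
  induction l with
  | nil => simp [PySem.Chars.join_nil]
  | cons p rest ih =>
    cases rest with
    | nil => simp [PySem.Chars.join_singleton]
    | cons q t => rw [PySem.Chars.join_cons_cons, List.flatten_cons, ← ih]; simp

-- sep ++ sep.join(l) glues sep in FRONT of every piece (l nonempty).
theorem pvJoinSep (sep : List Char) (l : List (List Char)) (hl : l ≠ []) :
    sep ++ PySem.Chars.join sep l = (l.map (sep ++ ·)).flatten := by
  induction l with
  | nil => exact absurd rfl hl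
  | cons p rest ih =>
    cases rest with
    | nil => simp [PySem.Chars.join_singleton]
    | cons q t =>
      rw [PySem.Chars.join_cons_cons, List.map_cons, List.flatten_cons, ← ih (by simp)]
      simp

-- String-level version of pvJoinSep.
theorem pvJoinSepStr (sep : String) (l : List String) (hl : l ≠ []) :
    (sep ++ PySem.Str.join sep l).toList = pvCat (l.map (fun w => sep ++ w)) := by
  rw [String.toList_append, PySem.Str.toList_join,
    pvJoinSep sep.toList _ (by simpa using hl), pvCat, List.map_map, List.map_map]
  congr 1
  apply List.map_congr_left
  intro w _
  simp [Function.comp, String.toList_append]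

-- W[1:k+1] is the table entries at indices 1..k.
theorem pvSliceW (k : Int) (h0 : 0 ≤ k) (h99 : k ≤ 99) :
    PySem.List.slice pvW (some 1) (some (k + 1)) =
      (PySem.List.pyRange 1 (k + 1) 1).map (fun i => PySem.List.pyGetD pvW i "") := by
  have hlen : pvW.length = 100 := by
    simp [pvW, PySem.List.length_pyRange_one]
  rw [PySem.List.slice_toNat pvW (by omega) (by omega), PySem.List.pyRange_one]
  have hk : (k + 1).toNat - (1:Int).toNat = k.toNat := by omega
  have hk2 : (k + 1 - 1).toNat = k.toNat := by omega
  rw [hk, hk2]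
  apply List.ext_getElem
  · simp [hlen]; omega
  · intro i hi1 hi2
    simp only [List.getElem_take, List.getElem_drop, List.getElem_map, List.getElem_range]
    have : (1 : Int) + (i : Int) = ((1 + i : Nat) : Int) := by push_cast; ring
    rw [this, PySem.List.pyGetD_natCast]
    have : 1 + i < pvW.length := by simp at hi1; omega
    simp [List.getD, List.getElem?_eq_getElem this]

theorem pvDivmod100 (h r : Int) (_h1 : 1 ≤ h) (_h9 : h ≤ 9) (hr0 : 0 ≤ r) (hr99 : r < 100) :
    PySem.Int.floordiv (100 * h + r) 100 = h ∧ PySem.Int.mod (100 * h + r) 100 = r := by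
  have hd : PySem.Int.floordiv (100 * h + r) 100 = h := by
    rw [PySem.Int.floordiv_eq_iff_of_pos (by norm_num)]; constructor <;> nlinarith
  refine ⟨hd, ?_⟩
  have := PySem.Int.floordiv_mul_add_mod (100 * h + r) 100
  rw [hd] at this; omega

-- pvWord at a full hundred.
theorem pvWord_h0 (h : Int) (h1 : 1 ≤ h) (h9 : h ≤ 9) :
    pvWord (100 * h) = PySem.List.pyGetD pvOnes h "" ++ "hundred" := by
  obtain ⟨hd, hm⟩ := pvDivmod100 h 0 h1 h9 le_rfl (by norm_num)
  rw [show 100 * h + 0 = 100 * h by ring] at hd hm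
  unfold pvWord
  rw [if_neg (by omega), hd, hm, if_pos rfl]

-- pvWord inside a hundreds block.
theorem pvWord_hr (h r : Int) (h1 : 1 ≤ h) (h9 : h ≤ 9) (hr1 : 1 ≤ r) (hr99 : r < 100) :
    pvWord (100 * h + r) =
      ((PySem.List.pyGetD pvOnes h "" ++ "hundred") ++ "and") ++ PySem.List.pyGetD pvW r "" := by
  obtain ⟨hd, hm⟩ := pvDivmod100 h r h1 h9 (by omega) hr99
  unfold pvWord
  rw [if_neg (by omega), hd, hm, if_neg (by omega)]

theorem pvWord_lt100 (a : Int) (ha : a < 100) :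
    pvWord a = PySem.List.pyGetD pvW a "" := by
  unfold pvWord; rw [if_pos ha]

theorem pvCat_append (x y : List String) : pvCat (x ++ y) = pvCat x ++ pvCat y := by
  simp [pvCat]

-- One hundreds block of B spells exactly the numbers 100h .. min(m,100h+99).
theorem pvBlock (m h : Int) (h1 : 1 ≤ h) (h9 : h ≤ 9) (hm : 100 * h ≤ m) :
    pvCat (pvG m h) =
      pvCat ((PySem.List.pyRange (100 * h) (100 * h + (min m (100 * h + 99) - 100 * h) + 1) 1).map pvWord) := by
  set k := min m (100 * h + 99) - 100 * h with hk
  have hk0 : 0 ≤ k := by omega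
  have hk99 : k ≤ 99 := by omega
  have hcons : PySem.List.pyRange (100 * h) (100 * h + k + 1) 1 =
      100 * h :: PySem.List.pyRange (100 * h + 1) (100 * h + k + 1) 1 :=
    PySem.List.pyRange_one_cons (by omega)
  have hrest : (PySem.List.pyRange (100 * h + 1) (100 * h + k + 1) 1).map pvWord =
      (List.range k.toNat).map (fun (t : Nat) =>
        ((PySem.List.pyGetD pvOnes h "" ++ "hundred") ++ "and") ++
          PySem.List.pyGetD pvW (1 + (t : Int)) "") := by
    rw [PySem.List.pyRange_one]
    have he : (100 * h + k + 1 - (100 * h + 1)).toNat = k.toNat := by omega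
    rw [he, List.map_map]
    apply List.map_congr_left
    intro t ht
    have ht' : (t : Int) < k := by
      simp only [List.mem_range] at ht; omega
    simp only [Function.comp]
    rw [show 100 * h + 1 + (t : Int) = 100 * h + (1 + (t : Int)) by ring,
      pvWord_hr h (1 + (t : Int)) h1 h9 (by omega) (by omega)]
  have hws : PySem.List.slice pvW (some 1) (some (k + 1)) =
      (List.range k.toNat).map (fun (t : Nat) => PySem.List.pyGetD pvW (1 + (t : Int)) "") := by
    rw [pvSliceW k hk0 hk99, PySem.List.pyRange_one]
    have he : (k + 1 - 1).toNat = k.toNat := by omega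
    rw [he, List.map_map]
    apply List.map_congr_left
    intro t _
    rfl
  unfold pvG
  rw [if_pos hm, ← hk, hcons]
  by_cases hkz : k = 0
  · rw [if_neg (show ¬(k ≠ 0) by simpa using hkz)]
    have he : (List.range k.toNat) = [] := by simp [hkz]
    simp [pvCat, hrest, he, pvWord_h0 h h1 h9, String.toList_append]
  · rw [if_pos hkz]
    have hne : (List.range k.toNat).map
        (fun (t : Nat) => PySem.List.pyGetD pvW (1 + (t : Int)) "") ≠ [] := by
      simp; omega
    simp only [pvCat, List.map_cons, List.map_append, List.map_nil, List.flatten_cons,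
      List.flatten_append, List.flatten_nil, List.append_nil]
    rw [hws, pvJoinSepStr _ _ hne, pvWord_h0 h h1 h9, hrest]
    simp only [pvCat, List.map_map]
    refine congrArg₂ (· ++ ·) rfl (congrArg List.flatten ?_)
    apply List.map_congr_left
    intro t _
    simp [Function.comp, String.toList_append]

-- The whole block loop of B spells exactly the numbers 100(10-j) .. m.
theorem pvBlocks (m : Int) (hm1 : 1 ≤ m) (hm2 : m ≤ 999) :
    ∀ j : Nat, j ≤ 9 →
      pvCat (((PySem.List.pyRange (10 - (j : Int)) 10 1).flatMap (pvG m))) =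
        pvCat ((PySem.List.pyRange (100 * (10 - (j : Int))) (m + 1) 1).map pvWord) := by
  intro j
  induction j with
  | zero =>
    intro _
    rw [show (10 : Int) - (0:Nat) = 10 by norm_num, PySem.List.pyRange_one_eq_nil le_rfl,
      PySem.List.pyRange_one_eq_nil (by omega)]
    rfl
  | succ j ih =>
    intro hj
    have ih' := ih (by omega)
    push_cast
    push_cast at ih'
    rw [show (10 : Int) - ((j:Int) + 1) = 9 - (j:Int) by ring]
    rw [show (10 : Int) - (j:Int) = (9 - (j:Int)) + 1 by ring] at ih'
    generalize hgen : (9 : Int) - (j:Int) = h at ih' ⊢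
    have h1 : 1 ≤ h := by omega
    have h9 : h ≤ 9 := by omega
    have hcons : PySem.List.pyRange h 10 1 = h :: PySem.List.pyRange (h + 1) 10 1 :=
      PySem.List.pyRange_one_cons (by omega)
    rw [hcons, List.flatMap_cons, pvCat_append]
    by_cases hm : 100 * h ≤ m
    · set k := min m (100 * h + 99) - 100 * h with hk
      have hsplit : PySem.List.pyRange (100 * h) (m + 1) 1 =
          PySem.List.pyRange (100 * h) (100 * h + k + 1) 1 ++
            PySem.List.pyRange (100 * h + k + 1) (m + 1) 1 :=
        PySem.List.pyRange_one_append _ _ _ (by omega) (by omega)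
      rw [hsplit, List.map_append, pvCat_append, pvBlock m h h1 h9 hm, ← hk, ih']
      by_cases hk99 : k = 99
      · rw [show 100 * (h + 1) = 100 * h + k + 1 by omega]
      · rw [PySem.List.pyRange_one_eq_nil (by omega : m + 1 ≤ 100 * (h + 1)),
          PySem.List.pyRange_one_eq_nil (by omega : m + 1 ≤ 100 * h + k + 1)]
    · have hg : pvG m h = [] := by unfold pvG; rw [if_neg hm]
      rw [hg, ih',
        PySem.List.pyRange_one_eq_nil (by omega : m + 1 ≤ 100 * (h + 1)),
        PySem.List.pyRange_one_eq_nil (by omega : m + 1 ≤ 100 * h)]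
      rfl

theorem pvCat_eq_join (l : List String) :
    (PySem.Str.join "" l).toList = pvCat l := by
  rw [PySem.Str.toList_join, show ("" : String).toList = [] from rfl, pvJoinNil]
  rfl

-- B's pre-tail string is the join of the words 1..m.
theorem pvBmain (m : Int) (h1 : 1 ≤ m) (h2 : m ≤ 999) :
    PySem.Str.join "" ((PySem.List.pyRange 1 10 1).foldl (fun parts h =>
      if 100 * h ≤ m then
        let k := min m (100 * h + 99) - 100 * h
        let head := PySem.List.pyGetD pvOnes h "" ++ "hundred"
        let parts := parts ++ [head]
        if k ≠ 0 then
          let hd := head ++ "and"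
          parts ++ [hd ++ PySem.Str.join hd (PySem.List.slice pvW (some 1) (some (k + 1)))]
        else parts
      else parts)
      [PySem.Str.join "" (PySem.List.slice pvW (some 1) (some (min m 99 + 1)))]) =
    PySem.Str.join "" ((PySem.List.pyRange 1 (m + 1) 1).map pvWord) := by
  apply String.toList_injective
  rw [pvCat_eq_join, pvCat_eq_join]
  have hbody : (fun (parts : List String) (h : Int) =>
      if 100 * h ≤ m then
        let k := min m (100 * h + 99) - 100 * h
        let head := PySem.List.pyGetD pvOnes h "" ++ "hundred"
        let parts := parts ++ [head]
        if k ≠ 0 then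
          let hd := head ++ "and"
          parts ++ [hd ++ PySem.Str.join hd (PySem.List.slice pvW (some 1) (some (k + 1)))]
        else parts
      else parts) = fun parts h => parts ++ pvG m h := by
    funext parts h
    unfold pvG
    by_cases hc : 100 * h ≤ m
    · rw [if_pos hc, if_pos hc]
      by_cases hkc : min m (100 * h + 99) - 100 * h ≠ 0
      · simp only [if_pos hkc, List.append_assoc, List.singleton_append]
      · simp only [if_neg hkc, List.append_nil]
    · rw [if_neg hc, if_neg hc]; simp
  rw [hbody, PySem.List.foldl_append_eq_flatMap, pvCat_append]
  have hk0a : 1 ≤ min m 99 := by omega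
  have hk0b : min m 99 ≤ 99 := by omega
  have hhead : pvCat [PySem.Str.join "" (PySem.List.slice pvW (some 1) (some (min m 99 + 1)))] =
      pvCat ((PySem.List.pyRange 1 (min m 99 + 1) 1).map pvWord) := by
    have h1' : pvCat [PySem.Str.join "" (PySem.List.slice pvW (some 1) (some (min m 99 + 1)))] =
        (PySem.Str.join "" (PySem.List.slice pvW (some 1) (some (min m 99 + 1)))).toList := by
      simp [pvCat]
    rw [h1', pvCat_eq_join, pvSliceW (min m 99) (by omega) hk0b]
    unfold pvCat
    congr 1
    rw [List.map_map, List.map_map]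
    apply List.map_congr_left
    intro i hi
    rw [PySem.List.mem_pyRange_one] at hi
    simp [Function.comp, pvWord_lt100 i (by omega)]
  have hblocks := pvBlocks m h1 h2 9 le_rfl
  rw [show (10 : Int) - ((9:Nat) : Int) = 1 by norm_num] at hblocks
  rw [show (100 : Int) * 1 = 100 by norm_num] at hblocks
  rw [hhead, hblocks]
  by_cases hm99 : m ≤ 99
  · rw [show min m 99 = m from min_eq_left hm99,
      PySem.List.pyRange_one_eq_nil (by omega : m + 1 ≤ 100)]
    simp [pvCat]
  · rw [show min m 99 = 99 from min_eq_right (by omega),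
      show (99 : Int) + 1 = 100 by norm_num, ← pvCat_append, ← List.map_append,
      ← PySem.List.pyRange_one_append 1 100 (m + 1) (by omega) (by omega)]

-- ===== VERDICT (by name: the statement is the Claim_ definition above) =====
theorem numLetterCount_spec : Claim_equal_numLetterCount := by
  intro n _
  unfold Spec_numLetterCount numLetterCount numLetterCount_alt
  by_cases hn0 : n < 1
  · rw [if_pos hn0, PySem.List.pyRange_one_eq_nil (by omega)]
    rfl
  · rw [if_neg hn0]
    by_cases hn : n ≤ 999
    · have hm : min n 999 = n := min_eq_left hn
      have hfold := pvFold_join (PySem.List.pyRange 1 (n + 1) 1)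
        (fun a ha => by rw [PySem.List.mem_pyRange_one] at ha; omega) ""
      have hB := pvBmain n (by omega) hn
      simp only [hm, hfold, String.empty_append, if_neg (by omega : ¬ 999 < n), hB]
    · have hm : min n 999 = 999 := min_eq_right (by omega)
      have hsplit : PySem.List.pyRange 1 (n + 1) 1 =
          PySem.List.pyRange 1 1000 1 ++ PySem.List.pyRange 1000 (n + 1) 1 :=
        PySem.List.pyRange_one_append 1 1000 (n + 1) (by omega) (by omega)
      have hA1 := pvFold_join (PySem.List.pyRange 1 1000 1)
        (fun a ha => by rw [PySem.List.mem_pyRange_one] at ha; omega) ""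
      have hA2 := pvFold_big (PySem.List.pyRange 1000 (n + 1) 1)
        (fun a ha => by rw [PySem.List.mem_pyRange_one] at ha; omega)
        (PySem.Str.join "" ((PySem.List.pyRange 1 1000 1).map pvWord))
      have hlen : (PySem.List.pyRange 1000 (n + 1) 1).length = (n - 999).toNat := by
        rw [PySem.List.length_pyRange_one]; omega
      have hB := pvBmain 999 (by omega) le_rfl
      simp only [hm, hsplit, List.foldl_append, hA1, String.empty_append, hA2, hlen,
        if_pos (by omega : 999 < n), hB, show (999 : Int) + 1 = 1000 from rfl]
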